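-- pv_equiv track=rewrite | github.com/BlueHeart-Saga/signapp | backend/routes/documents.py | calculate_file_page_ranges
-- ===== SOURCE A (Python) =====
-- def calculate_file_page_ranges(files):
--     """
--     Input: ordered document_files
--     Output: same files with start_page & end_page
--     """
--     current_page = 1
--     result = []
--
--     for f in files:
--         start_page = current_page
--         end_page = current_page + f["page_count"] - 1
--
--         result.append({
--             **f,
--             "start_page": start_page,
--             "end_page": end_page
--         })
--
--         current_page = end_page + 1
--
--     return result
-- ===== SOURCE B (Python) =====
-- def calculate_file_page_ranges(files):
--     """
--     Input: ordered document_files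
--     Output: same files with start_page & end_page
--     """
--     counts = [f["page_count"] for f in files]
--     starts = [1 + sum(counts[:i]) for i in range(len(counts))]
--     return [dict(f, start_page=s, end_page=s + c - 1)
--             for (f, c), s in zip(zip(files, counts), starts)]
-- ===== Notes on version B (the rewrite author's own statement) =====
-- stated objective: alternative
-- what changed: A's single pass threading a running current_page accumulator is replaced by a counts table plus a per-index prefix-sum starts table, followed by a separate construction pass zipping files with counts and starts.
import Mathlib
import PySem

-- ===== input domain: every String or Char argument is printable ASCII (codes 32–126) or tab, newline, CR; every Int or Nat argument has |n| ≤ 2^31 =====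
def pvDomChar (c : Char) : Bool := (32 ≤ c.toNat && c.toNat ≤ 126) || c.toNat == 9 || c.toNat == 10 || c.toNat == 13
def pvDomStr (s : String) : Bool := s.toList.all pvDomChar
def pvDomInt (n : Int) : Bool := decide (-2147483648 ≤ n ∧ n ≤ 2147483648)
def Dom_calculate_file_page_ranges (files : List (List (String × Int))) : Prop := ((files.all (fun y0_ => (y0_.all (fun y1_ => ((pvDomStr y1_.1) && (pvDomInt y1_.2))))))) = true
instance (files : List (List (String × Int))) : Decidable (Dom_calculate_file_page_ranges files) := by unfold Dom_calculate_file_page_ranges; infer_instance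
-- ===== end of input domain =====

-- B replaces A's single accumulating pass by a counts table + per-index prefix-sum starts table + a construction pass (objective: alternative decomposition, not faster).


-- ===== PORT A =====
-- f["page_count"] raises KeyError when the key is missing; Pre_ excludes that, so the
-- lookup is ported as getD with an irrelevant default.
def calculate_file_page_ranges (files : List (List (String × Int))) : List (List (String × Int)) :=
  (files.foldl
    (fun (st : Int × List (List (String × Int))) f =>
      let start_page := st.1
      let end_page := st.1 + (PySem.Dict.mk f).getD "page_count" 0 - 1
      (end_page + 1,
       st.2 ++ [(((PySem.Dict.mk f).insert "start_page" start_page).insert "end_page" end_page).items]))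
    (1, [])).2

-- ===== PORT B =====
def calculate_file_page_ranges_alt (files : List (List (String × Int))) : List (List (String × Int)) :=
  let counts := files.map (fun f => (PySem.Dict.mk f).getD "page_count" 0)
  let starts := (PySem.List.pyRange 0 (counts.length : Int)).map
      (fun i => 1 + (PySem.List.slice counts none (some i)).sum)
  ((files.zip counts).zip starts).map (fun p =>
    (((PySem.Dict.mk p.1.1).insert "start_page" p.2).insert "end_page" (p.2 + p.1.2 - 1)).items)

-- ===== PRECONDITION & SPEC =====
-- Pre_ excludes exactly the inputs where some file dict lacks the key "page_count",
-- on which Python A raises KeyError.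
def Pre_calculate_file_page_ranges (files : List (List (String × Int))) : Prop :=
  ∀ f ∈ files, "page_count" ∈ f.map Prod.fst
instance (files : List (List (String × Int))) : Decidable (Pre_calculate_file_page_ranges files) := by unfold Pre_calculate_file_page_ranges; infer_instance

def pvWitness_calculate_file_page_ranges : (List (List (String × Int))) :=
  [[("name", 3), ("page_count", 2)], [("page_count", 4)]]

def Spec_calculate_file_page_ranges (files : List (List (String × Int))) (out : List (List (String × Int))) : Prop := out = calculate_file_page_ranges_alt files
instance (files : List (List (String × Int))) (out : List (List (String × Int))) : Decidable (Spec_calculate_file_page_ranges files out) := by unfold Spec_calculate_file_page_ranges; infer_instance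

-- ===== CLAIM (what is proved, stated in full; the proofs are below) =====
def Claim_equal_calculate_file_page_ranges : Prop := ∀ (files : List (List (String × Int))), Dom_calculate_file_page_ranges files → Pre_calculate_file_page_ranges files → Spec_calculate_file_page_ranges files (calculate_file_page_ranges files)

-- ===== LEMMAS AND PROOFS =====

-- page count of one file dict
def pvPc (f : List (String × Int)) : Int := (PySem.Dict.mk f).getD "page_count" 0

-- the output row for one file with a given start page
def pvRow (f : List (String × Int)) (s : Int) : List (String × Int) :=
  (((PySem.Dict.mk f).insert "start_page" s).insert "end_page" (s + pvPc f - 1)).items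

-- A's loop, written as structural recursion on the remaining files with the running page
def pvBuild : List (List (String × Int)) → Int → List (List (String × Int))
  | [], _ => []
  | f :: fs, c => pvRow f c :: pvBuild fs (c + pvPc f)

lemma pvA_foldl (fs : List (List (String × Int))) (c : Int) (acc : List (List (String × Int))) :
    (fs.foldl
      (fun (st : Int × List (List (String × Int))) f =>
        (st.1 + (PySem.Dict.mk f).getD "page_count" 0 - 1 + 1,
         st.2 ++ [(((PySem.Dict.mk f).insert "start_page" st.1).insert "end_page"
            (st.1 + (PySem.Dict.mk f).getD "page_count" 0 - 1)).items]))
      (c, acc)).2 = acc ++ pvBuild fs c := by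
  induction fs generalizing c acc with
  | nil => simp [pvBuild]
  | cons f fs ih =>
    simp only [List.foldl_cons, pvBuild, ih, pvRow, pvPc]
    simp

lemma pvBuild_eq (fs : List (List (String × Int))) (c : Int) :
    pvBuild fs c =
      ((fs.zip (fs.map pvPc)).zip
        ((List.range fs.length).map (fun i => c + ((fs.map pvPc).take i).sum))).map
        (fun p => pvRow p.1.1 p.2) := by
  induction fs generalizing c with
  | nil => simp [pvBuild]
  | cons f fs ih =>
    simp only [pvBuild, List.map_cons, List.length_cons, List.range_succ_eq_map,
      List.map_map, List.zip_cons_cons, List.take_zero, List.sum_nil, add_zero]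
    refine congrArg₂ _ rfl ?_
    rw [ih (c + pvPc f)]
    congr 1
    congr 1
    refine List.map_congr_left (fun i _ => ?_)
    simp [Function.comp, List.take_succ_cons, add_assoc]

lemma pvZip_map_snd {α β : Type} (g : α → β) :
    ∀ (l : List α) (p : α × β), p ∈ l.zip (l.map g) → p.2 = g p.1 := by
  intro l
  induction l with
  | nil => simp
  | cons a l ih =>
    intro p hp
    rcases (by simpa using hp : p = (a, g a) ∨ p ∈ l.zip (l.map g)) with h | h
    · simp [h]
    · exact ih p h

lemma pvB_eq (files : List (List (String × Int))) :
    calculate_file_page_ranges_alt files =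
      ((files.zip (files.map pvPc)).zip
        ((List.range files.length).map (fun i => 1 + ((files.map pvPc).take i).sum))).map
        (fun p => pvRow p.1.1 p.2) := by
  unfold calculate_file_page_ranges_alt
  simp only [List.length_map, PySem.List.pyRange_zero_nat, List.map_map]
  rw [show files.map (fun f => (PySem.Dict.mk f).getD "page_count" 0) = files.map pvPc from rfl]
  have h1 : List.map ((fun i => 1 + (PySem.List.slice (files.map pvPc) none (some i)).sum)
        ∘ fun k : Nat => (k : Int)) (List.range files.length)
      = List.map (fun i => 1 + ((files.map pvPc).take i).sum) (List.range files.length) :=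
    List.map_congr_left (fun i _ => by simp [Function.comp, PySem.List.slice_to_natCast])
  rw [h1]
  refine List.map_congr_left (fun p hp => ?_)
  obtain ⟨⟨f, c⟩, s⟩ := p
  have hc : c = pvPc f := pvZip_map_snd pvPc files (f, c) (List.of_mem_zip hp).1
  simp [pvRow, pvPc, hc]

-- ===== VERDICT (by name: the statement is the Claim_ definition above) =====
theorem calculate_file_page_ranges_spec : Claim_equal_calculate_file_page_ranges := by
  intro files _ _
  unfold Spec_calculate_file_page_ranges calculate_file_page_ranges
  rw [pvA_foldl files 1 [], List.nil_append, pvBuild_eq files 1, pvB_eq]
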